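-- pv_equiv track=rewrite | github.com/slosimon/FizRac | 2-pisni-izpit-201415/03-naloga-3-ocd.py | st_veljavnih
-- ===== SOURCE A (Python) =====
-- sos = {
--     1: [2, 4],
--     2: [1, 3, 5],
--     3: [2, 6],
--     4: [1, 5, 7],
--     5: [2, 4, 6, 8],
--     6: [3, 5, 9],
--     7: [4, 8],
--     8: [5, 7, 9, 0],
--     9: [6, 8],
--     0: [8]
-- }
--
-- def st_veljavnih(k): #DP
-- 	this_row = [1] * 10
-- 	for row in range(1, k):
-- 		prev_row = this_row
-- 		this_row = [0] * 10
-- 		for prev, nexts in sos.items():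
-- 			for next_ in nexts:
-- 				this_row[next_] += prev_row[prev]
-- 	return sum(this_row)
-- ===== SOURCE B (Python) =====
-- _ADJ = {
--     1: [2, 4],
--     2: [1, 3, 5],
--     3: [2, 6],
--     4: [1, 5, 7],
--     5: [2, 4, 6, 8],
--     6: [3, 5, 9],
--     7: [4, 8],
--     8: [5, 7, 9, 0],
--     9: [6, 8],
--     0: [8]
-- }
--
-- def _mat_mul(X, Y):
--     return [[sum(X[i][t] * Y[t][j] for t in range(10)) for j in range(10)]
--             for i in range(10)]
--
-- def _mat_pow(M, e):
--     R = [[1 if i == j else 0 for j in range(10)] for i in range(10)]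
--     while e > 0:
--         if e % 2 == 1:
--             R = _mat_mul(R, M)
--         M = _mat_mul(M, M)
--         e //= 2
--     return R
--
-- def st_veljavnih(k):
--     M = [[1 if j in _ADJ[i] else 0 for j in range(10)] for i in range(10)]
--     P = _mat_pow(M, max(k - 1, 0))
--     return sum(P[i][j] for i in range(10) for j in range(10))
-- ===== Notes on version B (the rewrite author's own statement) =====
-- stated objective: faster
-- what changed: replaces the O(k) dynamic-programming sweep over rows with binary exponentiation of the fixed 10x10 adjacency matrix and sums all entries of its (k-1)-th power
import Mathlib
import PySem

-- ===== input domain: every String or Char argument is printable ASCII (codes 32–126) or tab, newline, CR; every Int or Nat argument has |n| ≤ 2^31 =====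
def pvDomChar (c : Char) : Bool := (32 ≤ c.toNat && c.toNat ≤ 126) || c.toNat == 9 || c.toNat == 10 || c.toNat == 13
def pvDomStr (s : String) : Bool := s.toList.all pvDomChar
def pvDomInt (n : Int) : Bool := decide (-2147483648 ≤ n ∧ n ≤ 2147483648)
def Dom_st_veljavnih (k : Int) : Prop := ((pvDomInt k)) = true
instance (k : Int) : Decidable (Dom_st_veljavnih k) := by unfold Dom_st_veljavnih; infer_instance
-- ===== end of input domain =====

-- B replaces A's O(k) row-by-row DP with binary exponentiation of the fixed 10x10
-- adjacency matrix (O(log k) matrix multiplications); return values proved equal.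

-- ===== PORT A =====
-- the module-level dict `sos` (insertion order preserved)
def sosList : List (Nat × List Nat) :=
  [(1, [2, 4]), (2, [1, 3, 5]), (3, [2, 6]), (4, [1, 5, 7]), (5, [2, 4, 6, 8]),
   (6, [3, 5, 9]), (7, [4, 8]), (8, [5, 7, 9, 0]), (9, [6, 8]), (0, [8])]

-- one iteration of A's outer loop body: this_row = [0]*10; nested += loop
def stepA (prev_row : List Int) : List Int :=
  sosList.foldl
    (fun this pn =>
      pn.2.foldl (fun this n => this.set n (this.getD n 0 + prev_row.getD pn.1 0)) this)
    (List.replicate 10 0)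

def st_veljavnih (k : Int) : Int :=
  ((PySem.List.pyRange 1 k 1).foldl (fun row _ => stepA row) (List.replicate 10 1)).sum

-- ===== PORT B =====
def bAdj : PySem.Dict Nat (List Nat) := PySem.Dict.ofList
  [(1, [2, 4]), (2, [1, 3, 5]), (3, [2, 6]), (4, [1, 5, 7]), (5, [2, 4, 6, 8]),
   (6, [3, 5, 9]), (7, [4, 8]), (8, [5, 7, 9, 0]), (9, [6, 8]), (0, [8])]

def matMul (X Y : List (List Int)) : List (List Int) :=
  (List.range 10).map (fun i =>
    (List.range 10).map (fun j =>
      ((List.range 10).map (fun t => (X.getD i []).getD t 0 * (Y.getD t []).getD j 0)).sum))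

def idMat : List (List Int) :=
  (List.range 10).map (fun i => (List.range 10).map (fun j => if i = j then (1 : Int) else 0))

-- the while-loop of _mat_pow, recursing on e
def matPowLoop (R M : List (List Int)) (e : Nat) : List (List Int) :=
  if e = 0 then R
  else matPowLoop (if e % 2 = 1 then matMul R M else R) (matMul M M) (e / 2)
termination_by e
decreasing_by exact Nat.div_lt_self (Nat.pos_of_ne_zero (by assumption)) one_lt_two

def matB : List (List Int) :=
  (List.range 10).map (fun i =>
    (List.range 10).map (fun j => if j ∈ (PySem.Dict.getD bAdj i []) then (1 : Int) else 0))

def st_veljavnih_alt (k : Int) : Int :=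
  let P := matPowLoop idMat matB (max (k - 1) 0).toNat
  ((List.range 10).map (fun i => ((List.range 10).map (fun j => (P.getD i []).getD j 0)).sum)).sum

-- ===== PRECONDITION & SPEC =====
def Spec_st_veljavnih (k : Int) (out : Int) : Prop := out = st_veljavnih_alt k
instance (k : Int) (out : Int) : Decidable (Spec_st_veljavnih k out) := by unfold Spec_st_veljavnih; infer_instance

-- ===== CLAIM (what is proved, stated in full; the proofs are below) =====
def Claim_equal_st_veljavnih : Prop := ∀ (k : Int), Dom_st_veljavnih k → Spec_st_veljavnih k (st_veljavnih k)

-- ===== LEMMAS AND PROOFS =====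

-- abstract model: 10x10 integer matrices over Fin 10
def toMat (X : List (List Int)) : Matrix (Fin 10) (Fin 10) Int :=
  fun i j => (X.getD i []).getD j 0

def vecOf (v : List Int) : Fin 10 → Int := fun i => v.getD i 0

def onesV : Fin 10 → Int := fun _ => 1

lemma getD_range_map {α} (f : Nat → α) (d : α) {i n : Nat} (h : i < n) :
    ((List.range n).map f).getD i d = f i := by
  simp [List.getD, h]

lemma sum_range10_map (f : Nat → Int) :
    ((List.range 10).map f).sum = ∑ t : Fin 10, f t := by
  simp [List.range_succ, Fin.sum_univ_succ]

lemma toMat_matMul (X Y : List (List Int)) : toMat (matMul X Y) = toMat X * toMat Y := by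
  funext i j
  rw [Matrix.mul_apply]
  show (List.getD (matMul X Y) i []).getD j 0 = _
  rw [matMul, getD_range_map _ _ i.isLt, getD_range_map _ _ j.isLt, sum_range10_map]
  rfl

lemma toMat_idMat : toMat idMat = 1 := by
  funext i j
  show (List.getD idMat i []).getD j 0 = _
  rw [idMat, getD_range_map _ _ i.isLt, getD_range_map _ _ j.isLt, Matrix.one_apply]
  simp [Fin.val_inj]

lemma toMat_matPowLoop : ∀ (e : Nat) (R M : List (List Int)),
    toMat (matPowLoop R M e) = toMat R * (toMat M) ^ e := by
  intro e
  induction e using Nat.strong_induction_on with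
  | _ e ih =>
    intro R M
    rw [matPowLoop]
    by_cases h : e = 0
    · simp [h]
    · rw [if_neg h, ih (e / 2) (Nat.div_lt_self (Nat.pos_of_ne_zero h) one_lt_two),
        toMat_matMul M M]
      have hsq : (toMat M * toMat M) ^ (e / 2) = toMat M ^ (2 * (e / 2)) := by
        rw [← sq, ← pow_mul]
      by_cases hodd : e % 2 = 1
      · rw [if_pos hodd, toMat_matMul, hsq, mul_assoc, ← pow_succ',
          show 2 * (e / 2) + 1 = e by omega]
      · rw [if_neg hodd, hsq, show 2 * (e / 2) = e by omega]

-- A's step on an explicit length-10 row, computed definitionally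
set_option maxHeartbeats 1000000 in
lemma stepA_eval (v0 v1 v2 v3 v4 v5 v6 v7 v8 v9 : Int) :
    stepA [v0, v1, v2, v3, v4, v5, v6, v7, v8, v9] =
      [0 + v8, 0 + v2 + v4, 0 + v1 + v3 + v5, 0 + v2 + v6, 0 + v1 + v5 + v7,
       0 + v2 + v4 + v6 + v8, 0 + v3 + v5 + v9, 0 + v4 + v8, 0 + v5 + v7 + v9 + v0,
       0 + v6 + v8] := by
  simp only [stepA, sosList, List.foldl_cons, List.foldl_nil, List.replicate,
    List.set, List.getD, List.getElem?_cons_zero, List.getElem?_cons_succ, Option.getD_some]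

-- proof-side closed form of B's adjacency matrix
def nb : Nat → List Nat
  | 1 => [2, 4] | 2 => [1, 3, 5] | 3 => [2, 6] | 4 => [1, 5, 7] | 5 => [2, 4, 6, 8]
  | 6 => [3, 5, 9] | 7 => [4, 8] | 8 => [5, 7, 9, 0] | 9 => [6, 8] | 0 => [8] | _ => []

def adjM : Matrix (Fin 10) (Fin 10) Int := fun i j => if (j : Nat) ∈ nb i then 1 else 0

set_option maxHeartbeats 1000000 in
lemma matB_eq : toMat matB = adjM := by decide

lemma vecOf_stepA (w : List Int) (hw : w.length = 10) :
    vecOf (stepA w) = Matrix.vecMul (vecOf w) (toMat matB) := by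
  rw [matB_eq]
  match w, hw with
  | [v0, v1, v2, v3, v4, v5, v6, v7, v8, v9], _ =>
    funext j
    rw [Matrix.vecMul, stepA_eval]
    show _ = Finset.univ.sum _
    fin_cases j <;>
      simp [vecOf, Fin.sum_univ_succ, adjM, nb] <;> ring

lemma stepA_len (v : List Int) : (stepA v).length = 10 := by
  simp [stepA, sosList]

lemma iter_len (n : Nat) : (stepA^[n] (List.replicate 10 1)).length = 10 := by
  cases n with
  | zero => rfl
  | succ n => rw [Function.iterate_succ_apply']; exact stepA_len _

lemma iter_invariant (n : Nat) :
    vecOf (stepA^[n] (List.replicate 10 1)) =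
      Matrix.vecMul onesV ((toMat matB) ^ n) := by
  induction n with
  | zero =>
    rw [pow_zero, Matrix.vecMul_one]
    funext j
    fin_cases j <;> rfl
  | succ n ih =>
    rw [Function.iterate_succ_apply', vecOf_stepA _ (iter_len n), ih,
      Matrix.vecMul_vecMul, ← pow_succ]

lemma list_sum_eq (w : List Int) (hw : w.length = 10) :
    w.sum = ∑ j : Fin 10, vecOf w j := by
  match w, hw with
  | [v0, v1, v2, v3, v4, v5, v6, v7, v8, v9], _ =>
    simp [Fin.sum_univ_succ, vecOf]

lemma foldl_const {α β : Type} (f : β → β) (l : List α) (init : β) :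
    l.foldl (fun r _ => f r) init = f^[l.length] init := by
  induction l generalizing init with
  | nil => rfl
  | cons a l ih => simp [List.foldl_cons, ih, Function.iterate_succ_apply]

-- ===== VERDICT (by name: the statement is the Claim_ definition above) =====
theorem st_veljavnih_spec : Claim_equal_st_veljavnih := by
  intro k _
  unfold Spec_st_veljavnih st_veljavnih st_veljavnih_alt
  set n : Nat := (max (k - 1) 0).toNat with hn
  have hlenr : (PySem.List.pyRange 1 k 1).length = n := by
    rw [PySem.List.length_pyRange_one]; omega
  rw [foldl_const, hlenr]
  have hvec := iter_invariant n
  rw [list_sum_eq _ (iter_len n)]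
  have hP : toMat (matPowLoop idMat matB n) = (toMat matB) ^ n := by
    rw [toMat_matPowLoop, toMat_idMat, one_mul]
  calc ∑ j : Fin 10, vecOf (stepA^[n] (List.replicate 10 1)) j
      = ∑ j : Fin 10, Matrix.vecMul onesV ((toMat matB) ^ n) j := by rw [hvec]
    _ = ∑ j : Fin 10, ∑ i : Fin 10, ((toMat matB) ^ n) i j := by
        refine Finset.sum_congr rfl fun j _ => ?_
        rw [Matrix.vecMul]
        show Finset.univ.sum _ = _
        refine Finset.sum_congr rfl fun i _ => ?_
        simp [onesV]
    _ = ∑ i : Fin 10, ∑ j : Fin 10, ((toMat matB) ^ n) i j := Finset.sum_comm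
    _ = _ := by
        rw [sum_range10_map]
        refine Finset.sum_congr rfl fun i _ => ?_
        rw [sum_range10_map]
        refine Finset.sum_congr rfl fun j _ => ?_
        have := congrFun (congrFun hP i) j
        exact this.symm
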